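-- pv_equiv track=rewrite | github.com/smohapatra1/scripting | python/practice/start_again/2024/09082024/uppercase_half_string.py | Upper
-- ===== SOURCE A (Python) =====
-- def Upper(test_str):
--     m = len(test_str)//2
--     res = ''
--     for i in range(len(test_str)):
--         if i >= m:
--             res +=test_str[i].upper()
--         else:
--             res +=test_str[i]
--     return res
-- ===== SOURCE B (Python) =====
-- def Upper(test_str):
--     m = len(test_str)//2
--     return test_str[:m] + test_str[m:].upper()
-- ===== Notes on version B (the rewrite author's own statement) =====
-- stated objective: idiomatic
-- what changed: Replaces the per-index loop with its conditional branch and character-by-character accumulation by two slices and one bulk .upper() on the second half.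
import Mathlib
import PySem

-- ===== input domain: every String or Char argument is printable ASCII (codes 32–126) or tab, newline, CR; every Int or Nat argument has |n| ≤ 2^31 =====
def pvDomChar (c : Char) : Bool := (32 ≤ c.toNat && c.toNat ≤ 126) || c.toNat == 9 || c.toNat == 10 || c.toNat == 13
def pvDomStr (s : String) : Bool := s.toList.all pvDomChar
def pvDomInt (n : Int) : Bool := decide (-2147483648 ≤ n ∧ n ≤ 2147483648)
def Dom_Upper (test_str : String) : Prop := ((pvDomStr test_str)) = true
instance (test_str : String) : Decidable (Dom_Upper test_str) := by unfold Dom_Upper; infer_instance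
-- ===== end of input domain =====

-- B uppercases the second half by two slices and one bulk upper() instead of A's per-index
-- conditional loop; return values proved equal on all inputs.

-- ===== PORT A =====
-- A: m = len//2; accumulate char by char, uppercasing at indices i ≥ m.
def Upper (test_str : String) : String :=
  let m := PySem.Int.floordiv (PySem.Str.len test_str) 2
  let cs := test_str.toList
  String.ofList ((PySem.List.pyRange 0 (PySem.Str.len test_str) 1).foldl
    (fun res i =>
      if i ≥ m then res ++ [PySem.Chars.upperChar (PySem.List.pyGetD cs i ' ')]
      else res ++ [PySem.List.pyGetD cs i ' ']) [])

-- ===== PORT B =====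
-- B: test_str[:m] + test_str[m:].upper()
def Upper_alt (test_str : String) : String :=
  let m := PySem.Int.floordiv (PySem.Str.len test_str) 2
  let cs := test_str.toList
  String.ofList (PySem.Chars.slice cs none (some m) ++
    PySem.Chars.upper (PySem.Chars.slice cs (some m) none))

-- ===== PRECONDITION & SPEC =====
def Spec_Upper (test_str : String) (out : String) : Prop := out = Upper_alt test_str
instance (test_str : String) (out : String) : Decidable (Spec_Upper test_str out) := by unfold Spec_Upper; infer_instance

-- ===== CLAIM (what is proved, stated in full; the proofs are below) =====
def Claim_equal_Upper : Prop := ∀ (test_str : String), Dom_Upper test_str → Spec_Upper test_str (Upper test_str)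

-- ===== LEMMAS AND PROOFS =====

-- A's index-wise conditional map over range(len) is B's take/upper-drop split.
theorem upper_key (cs : List Char) (k : Nat) :
    (List.range cs.length).map
      (fun j => if k ≤ j then PySem.Chars.upperChar (cs.getD j ' ') else cs.getD j ' ')
    = cs.take k ++ (cs.drop k).map PySem.Chars.upperChar := by
  induction cs generalizing k with
  | nil => simp
  | cons c cs ih =>
    rw [List.length_cons, List.range_succ_eq_map, List.map_cons, List.map_map]
    cases k with
    | zero =>
      simp only [Nat.zero_le, if_pos, List.take_zero, List.drop_zero, List.nil_append,
        List.map_cons, List.getD_cons_zero]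
      congr 1
      simpa [Function.comp_def] using ih 0
    | succ k =>
      simp only [Function.comp_def, List.getD_cons_succ, List.getD_cons_zero,
        List.take_succ_cons, List.drop_succ_cons,
        List.cons_append]
      congr 1
      simpa [Nat.succ_le_succ_iff] using ih k

theorem Upper_spec_aux (test_str : String) : Upper test_str = Upper_alt test_str := by
  unfold Upper Upper_alt
  have hbr : (fun (res : List Char) (i : Int) =>
        if i ≥ (PySem.Int.floordiv (PySem.Str.len test_str) 2) then
          res ++ [PySem.Chars.upperChar (PySem.List.pyGetD test_str.toList i ' ')]
        else res ++ [PySem.List.pyGetD test_str.toList i ' '])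
      = fun res i => res ++ [if i ≥ (PySem.Int.floordiv (PySem.Str.len test_str) 2) then
          PySem.Chars.upperChar (PySem.List.pyGetD test_str.toList i ' ')
        else PySem.List.pyGetD test_str.toList i ' '] := by
    funext res i; split <;> rfl
  simp only []
  rw [hbr, PySem.List.foldl_append_singleton_eq_map]
  have hm : PySem.Int.floordiv ((test_str.toList.length : Int)) 2
      = ((test_str.toList.length / 2 : Nat) : Int) := by
    exact_mod_cast PySem.Int.floordiv_natCast test_str.toList.length 2
  simp only [PySem.Str.len_eq] at *
  simp only [hm]
  rw [PySem.List.pyRange_zero_natCast, List.map_map]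
  congr 1
  have hB : PySem.Chars.slice test_str.toList none (some ((test_str.toList.length / 2 : Nat) : Int))
        ++ PySem.Chars.upper (PySem.Chars.slice test_str.toList (some ((test_str.toList.length / 2 : Nat) : Int)) none)
      = test_str.toList.take (test_str.toList.length / 2)
        ++ (test_str.toList.drop (test_str.toList.length / 2)).map PySem.Chars.upperChar := by
    simp only [PySem.Chars.slice_eq_listSlice, PySem.List.slice_to_natCast,
      PySem.List.slice_from_natCast, PySem.Chars.upper]
  rw [List.nil_append, hB, ← upper_key test_str.toList (test_str.toList.length / 2)]
  apply List.map_congr_left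
  intro j hj
  simp only [Function.comp_apply, PySem.List.pyGetD_natCast, ge_iff_le, Nat.cast_le]

-- ===== VERDICT (by name: the statement is the Claim_ definition above) =====
theorem Upper_spec : Claim_equal_Upper := by
  intro s _
  exact Upper_spec_aux s
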